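-- pv_equiv track=rewrite | github.com/skirchess/ComPy | assignment4/MyLibrary.py | doubder
-- ===== SOURCE A (Python) =====
-- def doubder(cflist):
--     n=len(cflist)-1
--     arr = []
--     for i in range(n+1):
--         arr.append((n-i)*(n-i-1)*cflist[i])
--     arr.pop()  #popping last 2 elements for doub der
--     arr.pop()
--     return arr
-- ===== SOURCE B (Python) =====
-- def der(cf):
--     n = len(cf) - 1
--     scaled = [(n - i) * c for i, c in enumerate(cf)]
--     scaled.pop()
--     return scaled
--
--
-- def doubder(cflist):
--     return der(der(cflist))
-- ===== Notes on version B (the rewrite author's own statement) =====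
-- stated objective: simpler
-- what changed: B computes the second derivative as two applications of a one-step derivative helper (scale each coefficient by its power via enumerate, drop the constant term) instead of A's single pass with the combined factor (n-i)(n-i-1).
import Mathlib
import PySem

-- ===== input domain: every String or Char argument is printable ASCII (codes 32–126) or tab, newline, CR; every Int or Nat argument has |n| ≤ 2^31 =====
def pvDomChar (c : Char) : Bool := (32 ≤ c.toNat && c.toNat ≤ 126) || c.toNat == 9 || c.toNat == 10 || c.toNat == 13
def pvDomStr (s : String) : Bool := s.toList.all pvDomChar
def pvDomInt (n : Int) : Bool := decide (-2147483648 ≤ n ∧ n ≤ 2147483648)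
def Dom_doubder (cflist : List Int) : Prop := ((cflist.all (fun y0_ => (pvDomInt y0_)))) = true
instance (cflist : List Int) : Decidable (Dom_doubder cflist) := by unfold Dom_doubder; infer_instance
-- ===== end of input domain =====

-- B computes the second derivative as der (der cflist) with a one-step derivative
-- helper, instead of A's single pass with the combined factor (n-i)(n-i-1).

-- ===== PORT A =====
-- arr.pop() removes the last element; ported as dropLast, exact since Pre_ guarantees
-- the list is nonempty at each pop (Python raises IndexError otherwise, excluded by Pre_).
def doubder (cflist : List Int) : List Int :=
  let n : Int := (cflist.length : Int) - 1
  let arr : List Int :=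
    (PySem.List.pyRange 0 (n + 1) 1).foldl
      (fun acc i => acc ++ [(n - i) * (n - i - 1) * PySem.List.pyGetD cflist i 0]) []
  arr.dropLast.dropLast

-- ===== PORT B =====
-- scaled.pop() on the nonempty list (guaranteed by Pre_) ported as dropLast.
def der (cf : List Int) : List Int :=
  let n : Int := (cf.length : Int) - 1
  ((PySem.List.enumerate cf 0).map (fun p => (n - p.1) * p.2)).dropLast

def doubder_alt (cflist : List Int) : List Int :=
  der (der cflist)

-- ===== PRECONDITION & SPEC =====
-- Python A raises IndexError on lists of length 0 or 1 (the pops run out of elements).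
def Pre_doubder (cflist : List Int) : Prop := 2 ≤ cflist.length
instance (cflist : List Int) : Decidable (Pre_doubder cflist) := by unfold Pre_doubder; infer_instance
def pvWitness_doubder : List Int := [3, 1, 4, 1]

def Spec_doubder (cflist : List Int) (out : List Int) : Prop := out = doubder_alt cflist
instance (cflist : List Int) (out : List Int) : Decidable (Spec_doubder cflist out) := by unfold Spec_doubder; infer_instance

-- ===== CLAIM (what is proved, stated in full; the proofs are below) =====
def Claim_equal_doubder : Prop := ∀ (cflist : List Int), Dom_doubder cflist → Pre_doubder cflist → Spec_doubder cflist (doubder cflist)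

-- ===== LEMMAS AND PROOFS =====

-- A's loop, normalised: a map over List.range.
theorem doubder_eq_map (cflist : List Int) :
    doubder cflist =
      (((List.range cflist.length).map
        (fun k => ((cflist.length : Int) - 1 - k) * ((cflist.length : Int) - 1 - k - 1) *
          cflist.getD k 0)).dropLast).dropLast := by
  unfold doubder
  dsimp only
  rw [PySem.List.foldl_append_eq_flatMap]
  rw [show ((cflist.length : Int) - 1 + 1) = (cflist.length : Int) by ring]
  rw [PySem.List.pyRange_zero_natCast]
  simp [List.flatMap_map, PySem.List.pyGetD_natCast, ← List.map_eq_flatMap]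

theorem der_length (cf : List Int) : (der cf).length = cf.length - 1 := by
  simp [der]

theorem der_getElem (cf : List Int) (k : Nat) (hk : k < (der cf).length) :
    (der cf)[k] = ((cf.length : Int) - 1 - k) * cf[k]'(by simp [der_length] at hk; omega) := by
  simp [der, PySem.List.getElem_enumerate] at hk ⊢

-- ===== VERDICT (by name: the statement is the Claim_ definition above) =====
theorem doubder_spec : Claim_equal_doubder := by
  intro cflist _ hpre
  unfold Spec_doubder doubder_alt
  rw [doubder_eq_map]
  unfold Pre_doubder at hpre
  apply List.ext_getElem
  · simp [der_length]
  · intro k h1 h2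
    have hk : k < cflist.length - 2 := by
      simp [der_length] at h2; omega
    rw [der_getElem _ _ h2]
    rw [der_getElem _ _ (by simp [der_length]; omega)]
    rw [List.getElem_dropLast, List.getElem_dropLast, List.getElem_map,
        List.getElem_range]
    simp [der_length]
    rw [List.getElem?_eq_getElem (by omega)]
    have hc : ((cflist.length - 1 : Nat) : Int) = (cflist.length : Int) - 1 := by omega
    simp [hc]
    ring
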